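-- pv_equiv track=rewrite | github.com/iwataka/google-code-jam | 2017/round2/roller_coaster_scheduling/main.py | solve
-- ===== SOURCE A (Python) =====
-- import math
--
-- def solve(n_seats, n_customers, tickets):
--     n_rides = 0
--     for i in range(1, n_seats + 1):
--         tmp_n_rides = math.ceil(sum([t[0] <= i for t in tickets]) / i)
--         if n_rides < tmp_n_rides:
--             n_rides = tmp_n_rides
--     for i in range(1, n_customers + 1):
--         tmp_n_rides = sum([t[1] == i for t in tickets])
--         if n_rides < tmp_n_rides:
--             n_rides = tmp_n_rides
--     n_promotions = 0
--     for i in range(1, n_seats + 1):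
--         n_promotions += max(sum([t[0] == i for t in tickets]) - n_rides, 0)
--     return n_rides, n_promotions
-- ===== SOURCE B (Python) =====
-- def solve(n_seats, n_customers, tickets):
--     cnt0 = {}
--     for t in tickets:
--         cnt0[t[0]] = cnt0.get(t[0], 0) + 1
--     cnt1 = {}
--     for t in tickets:
--         cnt1[t[1]] = cnt1.get(t[1], 0) + 1
--     n_rides = 0
--     run = sum(1 for t in tickets if t[0] <= 0)
--     for i in range(1, n_seats + 1):
--         run += cnt0.get(i, 0)
--         tmp = -(-run // i)  # exact integer ceiling of run / i
--         if n_rides < tmp: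
--             n_rides = tmp
--     for i in range(1, n_customers + 1):
--         v = cnt1.get(i, 0)
--         if n_rides < v:
--             n_rides = v
--     n_promotions = 0
--     for i in range(1, n_seats + 1):
--         n_promotions += max(cnt0.get(i, 0) - n_rides, 0)
--     return n_rides, n_promotions
-- ===== Notes on version B (the rewrite author's own statement) =====
-- stated objective: faster
-- what changed: B builds occurrence counters for ticket start and end values once and keeps a running prefix count, so each of the three range loops does O(1) work instead of rescanning the whole ticket list per index.
import Mathlib
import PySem

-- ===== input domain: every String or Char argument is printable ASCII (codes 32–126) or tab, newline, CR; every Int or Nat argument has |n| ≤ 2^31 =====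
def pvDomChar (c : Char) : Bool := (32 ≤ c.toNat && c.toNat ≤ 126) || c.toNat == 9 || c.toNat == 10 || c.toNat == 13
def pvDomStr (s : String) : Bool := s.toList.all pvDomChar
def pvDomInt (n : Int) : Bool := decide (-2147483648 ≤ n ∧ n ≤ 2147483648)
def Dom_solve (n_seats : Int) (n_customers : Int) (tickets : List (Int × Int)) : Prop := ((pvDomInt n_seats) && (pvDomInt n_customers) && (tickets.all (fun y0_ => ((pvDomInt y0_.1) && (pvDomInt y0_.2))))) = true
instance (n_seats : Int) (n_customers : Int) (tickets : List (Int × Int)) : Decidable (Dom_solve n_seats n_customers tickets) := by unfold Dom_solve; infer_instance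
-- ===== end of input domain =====

-- B replaces A's per-i rescans of the ticket list by two counters built once plus a running
-- prefix sum, turning O((n_seats+n_customers)·T) into O(n_seats+n_customers+T).

-- ===== PORT A =====
-- math.ceil(c / i) with 0 < i and |c| ≤ 2^31 is ported exactly as -((-c) // i): the float
-- division is correctly rounded and both operands are < 2^53, so the float ceil equals the
-- exact rational ceiling on this domain.
def solve (n_seats : Int) (n_customers : Int) (tickets : List (Int × Int)) : Int × Int :=
  let n1 : Int := (PySem.List.pyRange 1 (n_seats + 1) 1).foldl
    (fun n i =>
      let tmp := -(PySem.Int.floordiv (-((tickets.countP (fun t => decide (t.1 ≤ i)) : Nat) : Int)) i)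
      if n < tmp then tmp else n) 0
  let n2 : Int := (PySem.List.pyRange 1 (n_customers + 1) 1).foldl
    (fun n i =>
      let tmp := ((tickets.countP (fun t => decide (t.2 = i)) : Nat) : Int)
      if n < tmp then tmp else n) n1
  let p : Int := (PySem.List.pyRange 1 (n_seats + 1) 1).foldl
    (fun p i => p + max (((tickets.countP (fun t => decide (t.1 = i)) : Nat) : Int) - n2) 0) 0
  (n2, p)

-- ===== PORT B =====
def solve_alt (n_seats : Int) (n_customers : Int) (tickets : List (Int × Int)) : Int × Int :=
  let cnt0 : PySem.Dict Int Int :=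
    tickets.foldl (fun d t => d.insert t.1 (d.getD t.1 0 + 1)) PySem.Dict.empty
  let cnt1 : PySem.Dict Int Int :=
    tickets.foldl (fun d t => d.insert t.2 (d.getD t.2 0 + 1)) PySem.Dict.empty
  let run0 : Int := ((tickets.countP (fun t => decide (t.1 ≤ 0)) : Nat) : Int)
  let s1 : Int × Int := (PySem.List.pyRange 1 (n_seats + 1) 1).foldl
    (fun (st : Int × Int) i =>
      let run := st.1 + cnt0.getD i 0
      let tmp := -(PySem.Int.floordiv (-run) i)
      (run, if st.2 < tmp then tmp else st.2)) (run0, 0)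
  let n2 : Int := (PySem.List.pyRange 1 (n_customers + 1) 1).foldl
    (fun n i => let v := cnt1.getD i 0; if n < v then v else n) s1.2
  let p : Int := (PySem.List.pyRange 1 (n_seats + 1) 1).foldl
    (fun p i => p + max (cnt0.getD i 0 - n2) 0) 0
  (n2, p)

-- ===== PRECONDITION & SPEC =====
def Spec_solve (n_seats : Int) (n_customers : Int) (tickets : List (Int × Int)) (out : Int × Int) : Prop := out = solve_alt n_seats n_customers tickets
instance (n_seats : Int) (n_customers : Int) (tickets : List (Int × Int)) (out : Int × Int) : Decidable (Spec_solve n_seats n_customers tickets out) := by unfold Spec_solve; infer_instance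

-- ===== CLAIM (what is proved, stated in full; the proofs are below) =====
def Claim_equal_solve : Prop := ∀ (n_seats : Int) (n_customers : Int) (tickets : List (Int × Int)), Dom_solve n_seats n_customers tickets → Spec_solve n_seats n_customers tickets (solve n_seats n_customers tickets)

-- ===== LEMMAS AND PROOFS =====

-- the counting fold computes occurrence counts of (f t)
theorem getD_counterFold (f : Int × Int → Int) :
    ∀ (xs : List (Int × Int)) (d : PySem.Dict Int Int) (v : Int),
      (xs.foldl (fun d t => d.insert (f t) (d.getD (f t) 0 + 1)) d).getD v 0
        = d.getD v 0 + ((xs.countP (fun t => decide (f t = v)) : Nat) : Int) := by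
  intro xs
  induction xs with
  | nil => intro d v; simp
  | cons x xs ih =>
    intro d v
    simp only [List.foldl_cons, List.countP_cons, ih]
    rw [PySem.Dict.getD_insert]
    by_cases h : v = f x
    · subst h; simp; ring
    · have h' : ¬ (f x = v) := fun hh => h hh.symm
      simp [h, h']

theorem countP_le_split (tickets : List (Int × Int)) (i : Int) :
    ((tickets.countP (fun t => decide (t.1 ≤ i)) : Nat) : Int)
      = ((tickets.countP (fun t => decide (t.1 ≤ i - 1)) : Nat) : Int)
        + ((tickets.countP (fun t => decide (t.1 = i)) : Nat) : Int) := by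
  induction tickets with
  | nil => simp
  | cons x xs ih =>
    simp only [List.countP_cons]
    push_cast
    simp only [decide_eq_true_eq]
    split_ifs <;> omega

-- the first loop: carrying the running prefix count matches recomputing countP at each i
theorem loop1_eq (tickets : List (Int × Int)) :
    ∀ (k : Nat) (a b : Int), (b - a).toNat = k → ∀ (n run : Int),
      run = ((tickets.countP (fun t => decide (t.1 ≤ a - 1)) : Nat) : Int) →
      ((PySem.List.pyRange a b 1).foldl
        (fun (st : Int × Int) i =>
          (st.1 + ((tickets.countP (fun t => decide (t.1 = i)) : Nat) : Int),
           if st.2 < -PySem.Int.floordiv (-(st.1 + ((tickets.countP (fun t => decide (t.1 = i)) : Nat) : Int))) i then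
             -PySem.Int.floordiv (-(st.1 + ((tickets.countP (fun t => decide (t.1 = i)) : Nat) : Int))) i
           else st.2)) (run, n)).2
      = (PySem.List.pyRange a b 1).foldl
        (fun n i =>
          if n < -PySem.Int.floordiv (-((tickets.countP (fun t => decide (t.1 ≤ i)) : Nat) : Int)) i then
            -PySem.Int.floordiv (-((tickets.countP (fun t => decide (t.1 ≤ i)) : Nat) : Int)) i
          else n) n := by
  intro k
  induction k with
  | zero =>
    intro a b hk n run _
    rw [PySem.List.pyRange_one_eq_nil (by omega)]
    simp
  | succ k ih =>
    intro a b hk n run hrun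
    rw [PySem.List.pyRange_one_cons (by omega)]
    simp only [List.foldl_cons]
    have hstep : run + ((tickets.countP (fun t => decide (t.1 = a)) : Nat) : Int)
        = ((tickets.countP (fun t => decide (t.1 ≤ a)) : Nat) : Int) := by
      rw [hrun]
      exact (countP_le_split tickets a).symm
    rw [hstep]
    exact ih (a + 1) b (by omega) _ _ (by norm_num)

-- ===== VERDICT (by name: the statement is the Claim_ definition above) =====
theorem solve_spec : Claim_equal_solve := by
  intro n_seats n_customers tickets _
  show solve n_seats n_customers tickets = solve_alt n_seats n_customers tickets
  have h2 : ∀ i : Int, (tickets.foldl (fun d t => d.insert t.2 (d.getD t.2 0 + 1)) PySem.Dict.empty).getD i 0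
      = ((tickets.countP (fun t => decide (t.2 = i)) : Nat) : Int) := by
    intro i; rw [getD_counterFold (fun t => t.2)]; simp
  have h3 : ∀ i : Int, (tickets.foldl (fun d t => d.insert t.1 (d.getD t.1 0 + 1)) PySem.Dict.empty).getD i 0
      = ((tickets.countP (fun t => decide (t.1 = i)) : Nat) : Int) := by
    intro i; rw [getD_counterFold (fun t => t.1)]; simp
  unfold solve solve_alt
  simp only [h2, h3]
  rw [loop1_eq tickets (n_seats + 1 - 1).toNat 1 (n_seats + 1) rfl 0
      ((tickets.countP (fun t => decide (t.1 ≤ 0)) : Nat) : Int) (by norm_num)]
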